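-- pv_equiv track=rewrite | github.com/ArseniyZh/CIT | 3rd_year/ПиТПМ/лабы/лаба 2/18/smallest_in_longest_positive_sequence.py | smallest_in_longest_positive_sequence
-- ===== SOURCE A (Python) =====
-- def smallest_in_longest_positive_sequence(N, A):
--     max_length = 0
--     min_element = None
--     current_length = 0
--     current_min = None
--
--     for num in A:
--         if num > 0:
--             current_length += 1
--             if current_min is None or num < current_min:
--                 current_min = num
--         else:
--             if current_length > max_length:
--                 max_length = current_length
--                 min_element = current_min
--             elif current_length == max_length and current_min is not None:
--                 if min_element is None or current_min < min_element:
--                     min_element = current_min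
--             current_length = 0
--             current_min = None
--
--     # Проверка после цикла, если массив заканчивается положительной последовательностью
--     if current_length > max_length:
--         min_element = current_min
--     elif current_length == max_length and current_min is not None:
--         if min_element is None or current_min < min_element:
--             min_element = current_min
--
--     return min_element
-- ===== SOURCE B (Python) =====
-- def smallest_in_longest_positive_sequence(N, A):
--     # Phase 1: build the list of maximal positive runs as (length, minimum) pairs.
--     runs = []
--     cur_len = 0
--     cur_min = 0
--     for x in A:
--         if x > 0:
--             cur_min = x if cur_len == 0 else min(cur_min, x)
--             cur_len += 1
--         else:
--             if cur_len > 0: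
--                 runs.append((cur_len, cur_min))
--             cur_len = 0
--     if cur_len > 0:
--         runs.append((cur_len, cur_min))
--     # Phase 2: aggregate.
--     if not runs:
--         return None
--     L = max(l for l, _ in runs)
--     return min(m for l, m in runs if l == L)
-- ===== Notes on version B (the rewrite author's own statement) =====
-- stated objective: alternative
-- what changed: Replaces A's single online fold (best-so-far length/min with inline tie logic) by a two-phase build-then-aggregate: first construct the list of maximal positive runs as (length, min) pairs, then take the maximum run length and the minimum over the run-mins of all runs achieving it.
import Mathlib
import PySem

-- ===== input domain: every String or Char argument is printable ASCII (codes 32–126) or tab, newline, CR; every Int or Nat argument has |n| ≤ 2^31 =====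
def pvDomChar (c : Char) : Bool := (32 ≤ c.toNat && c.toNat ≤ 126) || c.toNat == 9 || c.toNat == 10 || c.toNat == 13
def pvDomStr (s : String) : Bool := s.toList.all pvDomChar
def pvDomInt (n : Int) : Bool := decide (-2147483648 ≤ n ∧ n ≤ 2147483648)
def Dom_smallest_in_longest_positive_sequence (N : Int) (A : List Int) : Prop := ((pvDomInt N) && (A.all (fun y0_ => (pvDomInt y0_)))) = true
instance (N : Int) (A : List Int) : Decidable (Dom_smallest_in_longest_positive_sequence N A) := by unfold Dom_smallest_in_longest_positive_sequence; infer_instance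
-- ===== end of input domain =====

-- B replaces A's single online fold by a build-then-aggregate decomposition: first the
-- list of maximal positive runs as (length, min) pairs, then max length and min over ties.

-- ===== PORT A =====
-- A's for-loop over (max_length, min_element, current_length, current_min); branches in source order.
-- "if min_element is None or current_min < min_element: min_element = current_min"
def aMerge (minE cm : Option Int) : Option Int :=
  match minE, cm with
  | none, c => c
  | some e, some c => if c < e then some c else some e
  | some e, none => some e

def aLoop : List Int → Int → Option Int → Int → Option Int → Option Int
  | [], maxL, minE, cl, cm =>
      -- post-loop check, then 'return min_element'
      if cl > maxL then cm
      else if cl = maxL ∧ cm ≠ none then aMerge minE cm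
      else minE
  | num :: rest, maxL, minE, cl, cm =>
      if num > 0 then
        aLoop rest maxL minE (cl + 1)
          (match cm with
           | none => some num
           | some m => if num < m then some num else some m)
      else if cl > maxL then
        aLoop rest cl cm 0 none
      else if cl = maxL ∧ cm ≠ none then
        aLoop rest maxL (aMerge minE cm) 0 none
      else
        aLoop rest maxL minE 0 none

def smallest_in_longest_positive_sequence (N : Int) (A : List Int) : Option Int :=
  aLoop A 0 none 0 none

-- ===== PORT B =====
-- Phase 1 of Source B: the for-loop building 'runs' (appends at the back; cur_min is 0-initialised
-- and only read when cur_len > 0, exactly as in Source B).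
def bRuns : List Int → List (Int × Int) → Int → Int → List (Int × Int)
  | [], runs, cl, cm => if cl > 0 then runs ++ [(cl, cm)] else runs
  | x :: rest, runs, cl, cm =>
      if x > 0 then bRuns rest runs (cl + 1) (if cl = 0 then x else min cm x)
      else if cl > 0 then bRuns rest (runs ++ [(cl, cm)]) 0 cm
      else bRuns rest runs 0 cm

-- Phase 2 of Source B: max(...) and min(...) are Python's builtins (PySem.List.max?/min?);
-- '.getD 0' only discharges the Option in the rs ≠ [] branch where max? is some.
def smallest_in_longest_positive_sequence_alt (N : Int) (A : List Int) : Option Int :=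
  let rs := bRuns A [] 0 0
  if rs = [] then none
  else
    let L := (PySem.List.max? (rs.map (fun p => p.1)) (fun y => y)).getD 0
    PySem.List.min? ((rs.filter (fun p => p.1 = L)).map (fun p => p.2)) (fun y => y)

-- ===== PRECONDITION & SPEC =====
def Spec_smallest_in_longest_positive_sequence (N : Int) (A : List Int) (out : Option Int) : Prop := out = smallest_in_longest_positive_sequence_alt N A
instance (N : Int) (A : List Int) (out : Option Int) : Decidable (Spec_smallest_in_longest_positive_sequence N A out) := by unfold Spec_smallest_in_longest_positive_sequence; infer_instance

-- ===== CLAIM (what is proved, stated in full; the proofs are below) =====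
def Claim_equal_smallest_in_longest_positive_sequence : Prop := ∀ (N : Int) (A : List Int), Dom_smallest_in_longest_positive_sequence N A → Spec_smallest_in_longest_positive_sequence N A (smallest_in_longest_positive_sequence N A)

-- ===== LEMMAS AND PROOFS =====

-- Intermediate aggregate: fold A's tie-breaking over an explicit run list.
def agg : List (Int × Int) → Int → Option Int → Option Int
  | [], _, minE => minE
  | (c, m) :: rs, maxL, minE =>
      if c > maxL then agg rs c (some m)
      else if c = maxL then agg rs maxL (some (match minE with | none => m | some e => min e m))
      else agg rs maxL minE

-- min of a nonempty Int list as Python computes it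
def ominL (l : List Int) : Option Int := match l with
  | [] => none
  | x :: t => some (t.foldl min x)

theorem merge_min (minE : Option Int) (cm : Int) :
    aMerge minE (some cm) = some (match minE with | none => cm | some e => min e cm) := by
  cases minE with
  | none => rfl
  | some e =>
      simp only [aMerge, min_def]
      split_ifs <;> (first | rfl | (congr 1; omega))

theorem bRuns_acc (l : List Int) : ∀ (acc : List (Int × Int)) (cl cm : Int),
    bRuns l acc cl cm = acc ++ bRuns l [] cl cm := by
  induction l with
  | nil =>
      intro acc cl cm
      by_cases h : cl > 0 <;> simp [bRuns, h]
  | cons x rest ih =>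
      intro acc cl cm
      by_cases h1 : x > 0
      · simp only [bRuns, if_pos h1]
        exact ih acc _ _
      · by_cases h2 : cl > 0
        · simp only [bRuns, if_neg h1, if_pos h2, List.nil_append]
          rw [ih (acc ++ [(cl, cm)]) 0 cm, ih [(cl, cm)] 0 cm]
          simp
        · simp only [bRuns, if_neg h1, if_neg h2]
          exact ih acc _ _

theorem aLoop_eq_agg (l : List Int) : ∀ (maxL : Int) (minE : Option Int) (cl cm : Int),
    0 ≤ maxL → 0 ≤ cl →
    aLoop l maxL minE cl (if 0 < cl then some cm else none) = agg (bRuns l [] cl cm) maxL minE := by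
  induction l with
  | nil =>
      intro maxL minE cl cm hm hc
      by_cases h : 0 < cl
      · rw [if_pos h]
        simp only [bRuns, if_pos h, List.nil_append, aLoop]
        by_cases h1 : cl > maxL
        · rw [if_pos h1]
          simp only [agg, if_pos h1]
        · rw [if_neg h1]
          simp only [agg, if_neg h1]
          by_cases h2 : cl = maxL
          · rw [if_pos ⟨h2, by simp⟩, if_pos h2, merge_min]
          · rw [if_neg (by tauto), if_neg h2]
      · have hc0 : cl = 0 := by omega
        subst hc0
        rw [if_neg h]
        simp only [bRuns, if_neg (by omega : ¬ (0:Int) > 0), aLoop]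
        rw [if_neg (by omega), if_neg (by simp)]
        rfl
  | cons x rest ih =>
      intro maxL minE cl cm hm hc
      by_cases hx : x > 0
      · simp only [bRuns, aLoop, if_pos hx]
        have key := ih maxL minE (cl + 1) (if cl = 0 then x else min cm x) hm (by omega)
        rw [if_pos (by omega)] at key
        rw [← key]
        congr 1
        by_cases h : 0 < cl
        · rw [if_pos h, if_neg (by omega : ¬ cl = 0)]
          simp only [min_def]
          split_ifs <;> (first | rfl | (congr 1; omega))
        · have : cl = 0 := by omega
          subst this; simp
      · by_cases h : 0 < cl
        · rw [if_pos h]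
          simp only [bRuns, if_neg hx, if_pos h, List.nil_append, aLoop]
          rw [bRuns_acc rest [(cl, cm)] 0 cm]
          simp only [List.singleton_append, agg]
          by_cases h1 : cl > maxL
          · rw [if_pos h1, if_pos h1]
            have := ih cl (some cm) 0 cm (by omega) le_rfl
            rw [if_neg (by omega)] at this
            exact this
          · rw [if_neg h1, if_neg h1]
            by_cases h2 : cl = maxL
            · rw [if_pos ⟨h2, by simp⟩, if_pos h2, merge_min]
              have := ih maxL (some (match minE with | none => cm | some e => min e cm)) 0 cm hm le_rfl
              rw [if_neg (by omega)] at this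
              exact this
            · rw [if_neg (by tauto), if_neg h2]
              have := ih maxL minE 0 cm hm le_rfl
              rw [if_neg (by omega)] at this
              exact this
        · have hc0 : cl = 0 := by omega
          subst hc0
          rw [if_neg h]
          simp only [bRuns, if_neg hx, if_neg (by omega : ¬ (0:Int) > 0), aLoop]
          rw [if_neg (by omega), if_neg (by simp)]
          have := ih maxL minE 0 cm hm le_rfl
          rw [if_neg (by omega)] at this
          exact this

-- A's tie-breaking equals: filter the runs achieving the running max, take their min.
theorem agg_some (rs : List (Int × Int)) : ∀ (maxL e : Int),
    agg rs maxL (some e) =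
      ominL ((((maxL, e) :: rs).filter
        (fun p => p.1 = ((rs.map (fun p => p.1)).foldl max maxL))).map (fun p => p.2)) := by
  induction rs with
  | nil => intro maxL e; simp [agg, ominL, List.filter]
  | cons p rs ih =>
      obtain ⟨c, m⟩ := p
      intro maxL e
      have hL : ∀ a : Int, ((( (c, m) :: rs).map (fun p => p.1)).foldl max a)
                 = (rs.map (fun p => p.1)).foldl max (max a c) := by
        intro a; simp [List.foldl_cons]
      simp only [agg]
      split_ifs with h1 h2
      · -- c > maxL : head (maxL,e) is dropped (maxL < c ≤ L)
        rw [hL maxL, (by omega : max maxL c = c)]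
        have hle : c ≤ (rs.map (fun p => p.1)).foldl max c := (PySem.List.le_foldl_max _ _).1
        conv_rhs => rw [List.filter_cons_of_neg (by simp; omega)]
        exact ih c m
      · -- c = maxL : merge e and m
        subst h2
        rw [hL c, (by omega : max c c = c)]
        rw [ih c (min e m)]
        set L := (rs.map (fun p => p.1)).foldl max c with hLdef
        by_cases hML : c = L
        · rw [List.filter_cons_of_pos (by simpa using hML),
              List.filter_cons_of_pos (by simpa using hML),
              List.filter_cons_of_pos (by simpa using hML)]
          simp only [List.map_cons, ominL, List.foldl_cons]
        · rw [List.filter_cons_of_neg (by simpa using hML),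
              List.filter_cons_of_neg (by simpa using hML),
              List.filter_cons_of_neg (by simpa using hML)]
      · -- c < maxL : the second element (c,m) is dropped
        rw [hL maxL, (by omega : max maxL c = maxL), ih maxL e]
        set L := (rs.map (fun p => p.1)).foldl max maxL with hLdef
        have hle : maxL ≤ L := (PySem.List.le_foldl_max _ _).1
        have hdrop : List.filter (fun p => decide (p.1 = L)) ((c, m) :: rs)
            = List.filter (fun p => decide (p.1 = L)) rs :=
          List.filter_cons_of_neg (by simp; omega)
        conv_lhs => rw [List.filter_cons]
        conv_rhs => rw [List.filter_cons, hdrop]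

-- every run built by phase 1 has length ≥ 1
theorem bRuns_pos (l : List Int) : ∀ (cl cm : Int), 0 ≤ cl →
    ∀ p ∈ bRuns l [] cl cm, 1 ≤ p.1 := by
  induction l with
  | nil =>
      intro cl cm hc p hp
      simp only [bRuns] at hp
      by_cases h : cl > 0
      · rw [if_pos h] at hp
        simp only [List.nil_append, List.mem_singleton] at hp
        rw [hp]; simpa using h
      · rw [if_neg h] at hp; simp at hp
  | cons x rest ih =>
      intro cl cm hc p hp
      simp only [bRuns] at hp
      by_cases h1 : x > 0
      · rw [if_pos h1] at hp
        exact ih (cl + 1) _ (by omega) p hp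
      · rw [if_neg h1] at hp
        by_cases h2 : cl > 0
        · rw [if_pos h2, bRuns_acc rest ([] ++ [(cl, cm)]) 0 cm] at hp
          simp only [List.nil_append, List.singleton_append, List.mem_cons] at hp
          rcases hp with h | h
          · rw [h]; simpa using h2
          · exact ih 0 cm le_rfl p h
        · rw [if_neg h2] at hp
          exact ih 0 cm le_rfl p hp

theorem min?_eq_ominL (l : List Int) : PySem.List.min? l (fun y => y) = ominL l := by
  cases l with
  | nil => simp [PySem.List.min?, ominL]
  | cons x t => rw [PySem.List.min?_id_cons]; rfl

theorem agg_eq_alt_body (rs : List (Int × Int)) (hpos : ∀ p ∈ rs, 1 ≤ p.1) :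
    agg rs 0 none =
      (if rs = [] then none
       else PySem.List.min? ((rs.filter
         (fun p => p.1 = (PySem.List.max? (rs.map (fun p => p.1)) (fun y => y)).getD 0)).map
           (fun p => p.2)) (fun y => y)) := by
  cases rs with
  | nil => simp [agg]
  | cons p rest =>
      obtain ⟨c, m⟩ := p
      have hc : 1 ≤ c := hpos (c, m) (by simp)
      rw [if_neg (by simp)]
      simp only [agg]
      rw [if_pos (by omega : c > (0:Int)), agg_some rest c m]
      have hmax : PySem.List.max? (((c, m) :: rest).map (fun p => p.1)) (fun y => y)
          = some ((rest.map (fun p => p.1)).foldl max c) := by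
        simp [PySem.List.max?_id_cons]
      rw [hmax]
      simp only [Option.getD_some]
      -- both sides: min over the filtered mins; relate min? to ominL
      rw [min?_eq_ominL]
      rfl

-- ===== VERDICT (by name: the statement is the Claim_ definition above) =====
theorem smallest_in_longest_positive_sequence_spec : Claim_equal_smallest_in_longest_positive_sequence := by
  intro N A _
  show smallest_in_longest_positive_sequence N A = smallest_in_longest_positive_sequence_alt N A
  unfold smallest_in_longest_positive_sequence smallest_in_longest_positive_sequence_alt
  have h := aLoop_eq_agg A 0 none 0 0 le_rfl le_rfl
  rw [if_neg (by omega)] at h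
  rw [h, agg_eq_alt_body (bRuns A [] 0 0) (bRuns_pos A 0 0 le_rfl)]
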